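-- pv_equiv track=rewrite | github.com/Lange99/IEEEXTREME-solutions | ieeextreme18/another_sliding_windows_problem.py | calculate_sum_of_matching_costs
-- ===== SOURCE A (Python) =====
-- def find_min_matching_cost(arr):
--     matching_cost = 0
--     lenght = len(arr)
--     if lenght % 2 == 1:
--         for i in range(int(lenght/2)):
--             matching_cost = max(matching_cost, arr[i] + arr[-2-i])
--     else:
--         for i in range(int(lenght/2)):
--             matching_cost = max(matching_cost, arr[i] + arr[-1-i])
--
--     return matching_cost
--
-- def calculate_sum_of_matching_costs(arr, max_matching_costs):
--     n = len(arr)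
--     sum = 0
--
--     for i in range(n):
--         for j in range(i + 1, n):
--             subarray = arr[i:j+1]
--             if subarray[0] < max_matching_costs:
--                 if find_min_matching_cost(subarray) <= max_matching_costs:
--                     sum += subarray[-1] - subarray[0]
--             else:
--                 return sum;
--     return sum
-- ===== SOURCE B (Python) =====
-- def calculate_sum_of_matching_costs(arr, max_matching_costs):
--     n = len(arr)
--     if max_matching_costs < 0:
--         return 0
--     b = n
--     for i in range(n - 1):
--         if arr[i] >= max_matching_costs:
--             b = i
--             break
--     total = 0
--     prev = [0] * n
--     for i in range(n - 2, -1, -1):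
--         cur = [arr[i] + arr[j] if j == i + 1
--                else (max(arr[i] + arr[j], prev[j - 1]) if j > i and (j - i) % 2 == 1 else 0)
--                for j in range(n)]
--         if i < b:
--             for j in range(i + 1, n):
--                 e = cur[j] if (j - i) % 2 == 1 else cur[j - 1]
--                 if e <= max_matching_costs:
--                     total += arr[j] - arr[i]
--         prev = cur
--     return total
-- ===== Notes on version B (the rewrite author's own statement) =====
-- stated objective: faster
-- what changed: Replaces the per-window recomputation of the fold-matching cost (an O(n) scan for each of the O(n^2) windows) by a bottom-up DP over window start rows: the pair-max of window (i,j) is max(arr[i]+arr[j], E[i+1][j-1]), so each row is filled from the previous one in O(n); the early-return is precomputed as the first index with arr[i] >= threshold, and a negative threshold short-circuits to 0 since matching costs are clamped at 0.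
import Mathlib
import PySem

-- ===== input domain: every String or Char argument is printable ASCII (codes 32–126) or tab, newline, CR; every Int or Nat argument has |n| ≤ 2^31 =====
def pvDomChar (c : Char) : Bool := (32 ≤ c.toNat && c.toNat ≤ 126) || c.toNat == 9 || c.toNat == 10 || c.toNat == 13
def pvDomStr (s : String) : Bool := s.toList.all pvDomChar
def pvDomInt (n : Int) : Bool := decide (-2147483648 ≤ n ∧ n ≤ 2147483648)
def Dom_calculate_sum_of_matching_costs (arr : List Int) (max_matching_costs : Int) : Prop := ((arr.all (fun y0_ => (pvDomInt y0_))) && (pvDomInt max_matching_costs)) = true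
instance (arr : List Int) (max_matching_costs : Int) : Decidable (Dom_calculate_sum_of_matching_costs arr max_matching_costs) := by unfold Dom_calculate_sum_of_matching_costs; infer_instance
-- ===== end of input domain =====

-- B replaces A's per-window O(n) cost recomputation by a row-by-row DP on the pair-max
-- (E(i,j) = max(arr[i]+arr[j], E(i+1,j-1))), giving O(n^2) instead of O(n^3); same return value.

-- ===== PORT A =====
-- arr[i] for an index that is always in range in the Python (default never used)
def pvG (xs : List Int) (i : Int) : Int := (PySem.List.pyGet? xs i).getD 0

def find_min_matching_cost (arr : List Int) : Int :=
  let lenght : Int := (arr.length : Int)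
  if lenght % 2 = 1 then
    (PySem.List.pyRange 0 (lenght / 2) 1).foldl
      (fun mc i => max mc (pvG arr i + pvG arr (-2 - i))) 0
  else
    (PySem.List.pyRange 0 (lenght / 2) 1).foldl
      (fun mc i => max mc (pvG arr i + pvG arr (-1 - i))) 0

-- inner loop over j; returns (sum, returned-early?)
def pvLoopJ (arr : List Int) (M : Int) (i : Int) : List Int → Int → Int × Bool
  | [], s => (s, false)
  | j :: js, s =>
    let subarray := PySem.List.slice arr (some i) (some (j + 1))
    if pvG subarray 0 < M then
      pvLoopJ arr M i js
        (if find_min_matching_cost subarray ≤ M then s + (pvG subarray (-1) - pvG subarray 0) else s)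
    else (s, true)

-- outer loop over i; the Bool signals Python's early `return sum`
def pvLoopI (arr : List Int) (M : Int) : List Int → Int → Int
  | [], s => s
  | i :: is, s =>
    match pvLoopJ arr M i (PySem.List.pyRange (i + 1) (arr.length : Int) 1) s with
    | (s', true) => s'
    | (s', false) => pvLoopI arr M is s'

def calculate_sum_of_matching_costs (arr : List Int) (max_matching_costs : Int) : Int :=
  pvLoopI arr max_matching_costs (PySem.List.pyRange 0 (arr.length : Int) 1) 0

-- ===== PORT B =====
-- first index i in range(n-1) with arr[i] >= M, else n  (the `for … break` loop)
def pvFindB (arr : List Int) (M : Int) : List Int → Int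
  | [] => (arr.length : Int)
  | i :: is => if M ≤ PySem.List.pyGetD arr i 0 then i else pvFindB arr M is

-- the row comprehension: cur[j] = pair-max of the even-gap window (i, j)
def pvRow (arr : List Int) (i : Int) (prev : List Int) : List Int :=
  (PySem.List.pyRange 0 (arr.length : Int) 1).map (fun j =>
    if j = i + 1 then PySem.List.pyGetD arr i 0 + PySem.List.pyGetD arr j 0
    else if i < j ∧ (j - i) % 2 = 1 then max (PySem.List.pyGetD arr i 0 + PySem.List.pyGetD arr j 0) (PySem.List.pyGetD prev (j - 1) 0)
    else 0)

-- the summation loop of one row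
def pvRowSum (arr : List Int) (M : Int) (i : Int) (cur : List Int) (total : Int) : Int :=
  (PySem.List.pyRange (i + 1) (arr.length : Int) 1).foldl
    (fun t j =>
      let e := if (j - i) % 2 = 1 then PySem.List.pyGetD cur j 0 else PySem.List.pyGetD cur (j - 1) 0
      if e ≤ M then t + (PySem.List.pyGetD arr j 0 - PySem.List.pyGetD arr i 0) else t) total

-- the downward loop over rows i = n-2 … 0, carrying (prev, total)
def pvRows (arr : List Int) (M b : Int) : List Int → List Int × Int → Int
  | [], (_, total) => total
  | i :: is, (prev, total) =>
    let cur := pvRow arr i prev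
    let total' := if i < b then pvRowSum arr M i cur total else total
    pvRows arr M b is (cur, total')

def calculate_sum_of_matching_costs_alt (arr : List Int) (max_matching_costs : Int) : Int :=
  let n : Int := (arr.length : Int)
  if max_matching_costs < 0 then 0
  else
    let b := pvFindB arr max_matching_costs (PySem.List.pyRange 0 (n - 1) 1)
    pvRows arr max_matching_costs b (PySem.List.pyRange (n - 2) (-1) (-1))
      (List.replicate arr.length 0, 0)

-- ===== PRECONDITION & SPEC =====
def Spec_calculate_sum_of_matching_costs (arr : List Int) (max_matching_costs : Int) (out : Int) : Prop := out = calculate_sum_of_matching_costs_alt arr max_matching_costs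
instance (arr : List Int) (max_matching_costs : Int) (out : Int) : Decidable (Spec_calculate_sum_of_matching_costs arr max_matching_costs out) := by unfold Spec_calculate_sum_of_matching_costs; infer_instance

-- ===== CLAIM (what is proved, stated in full; the proofs are below) =====
def Claim_equal_calculate_sum_of_matching_costs : Prop := ∀ (arr : List Int) (max_matching_costs : Int), Dom_calculate_sum_of_matching_costs arr max_matching_costs → Spec_calculate_sum_of_matching_costs arr max_matching_costs (calculate_sum_of_matching_costs arr max_matching_costs)

-- ===== LEMMAS AND PROOFS =====

-- canonical description of both programs
def ga (arr : List Int) (k : Nat) : Int := arr.getD k 0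

-- pair-max of the even-length window [i, j] (defined for j - i odd; peels the outermost pair)
def pvE (arr : List Int) (i j : Nat) : Int :=
  if j ≤ i + 1 then ga arr i + ga arr j
  else max (ga arr i + ga arr j) (pvE arr (i + 1) (j - 1))
termination_by j - i
decreasing_by omega

def cost (arr : List Int) (i j : Nat) : Int :=
  if (j - i) % 2 = 1 then max 0 (pvE arr i j) else max 0 (pvE arr i (j - 1))

def pay (arr : List Int) (M : Int) (i j : Nat) : Int :=
  if cost arr i j ≤ M then ga arr j - ga arr i else 0

def row (arr : List Int) (M : Int) (i : Nat) : Int :=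
  ∑ j ∈ Finset.Ico (i + 1) arr.length, pay arr M i j

-- tail of A's computation from row k on (stops at the first bad index < n-1)
def SA (arr : List Int) (M : Int) (k : Nat) : Int :=
  if k < arr.length then
    (if k < arr.length - 1 ∧ M ≤ ga arr k then 0 else row arr M k + SA arr M (k + 1))
  else 0
termination_by arr.length - k

-- first index i ∈ [k, n-1) with arr[i] ≥ M, else n
def bFrom (arr : List Int) (M : Int) (k : Nat) : Nat :=
  if k < arr.length - 1 then (if M ≤ ga arr k then k else bFrom arr M (k + 1)) else arr.length
termination_by arr.length - 1 - k

-- prev holds the pair-max of every odd-gap window starting at i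
def RowInv (arr prev : List Int) (i : Nat) : Prop :=
  ∀ j : Nat, i < j → j < arr.length → (j - i) % 2 = 1 → prev.getD j 0 = pvE arr i j

-- index bridges
theorem pvG_natCast (xs : List Int) (k : Nat) : pvG xs (k : Int) = xs.getD k 0 := by
  simp [pvG, PySem.List.pyGet?_natCast, List.getD_eq_getElem?_getD]

theorem pvG_neg (xs : List Int) (k : Nat) (h1 : 0 < k) (h2 : k ≤ xs.length) :
    pvG xs (-(k : Int)) = xs.getD (xs.length - k) 0 := by
  rw [pvG, PySem.List.pyGet?_neg_natCast xs k h1 h2, List.getD_eq_getElem?_getD]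

theorem getD_slice (arr : List Int) (i p m : Nat) (hp : p < m) :
    ((arr.drop i).take m).getD p 0 = ga arr (i + p) := by
  simp [ga, List.getD_eq_getElem?_getD, hp, List.getElem?_drop]

-- the running-max fold over the pairs of window (i, j) is the pair-max pvE
theorem fold_max (arr : List Int) :
    ∀ (t i j : Nat) (acc : Int), 0 < t → i + 2 * t = j + 1 →
      (List.range t).foldl (fun mc k => max mc (ga arr (i + k) + ga arr (j - k))) acc
        = max acc (pvE arr i j) := by
  intro t
  induction t with
  | zero => intro i j acc h; omega
  | succ t ih =>
    intro i j acc _ hsum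
    rw [List.range_succ_eq_map, List.foldl_cons, List.foldl_map]
    have hfe : (fun (mc : Int) (k : Nat) => max mc (ga arr (i + Nat.succ k) + ga arr (j - Nat.succ k)))
        = fun (mc : Int) (k : Nat) => max mc (ga arr ((i + 1) + k) + ga arr ((j - 1) - k)) := by
      funext mc k
      have h1 : i + Nat.succ k = (i + 1) + k := by omega
      have h2 : j - Nat.succ k = (j - 1) - k := by omega
      rw [h1, h2]
    rw [hfe]
    rcases Nat.eq_zero_or_pos t with ht | ht
    · subst ht
      rw [pvE]
      rw [if_pos (by omega)]
      simp
    · have hsum2 : (i + 1) + 2 * t = (j - 1) + 1 := by omega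
      rw [ih (i + 1) (j - 1) _ ht hsum2]
      conv_rhs => rw [pvE]
      rw [if_neg (by omega), max_assoc]
      norm_num

-- A's helper on a slice computes `cost`
theorem find_slice (arr : List Int) (i j : Nat) (hij : i < j) (hj : j < arr.length) :
    find_min_matching_cost (PySem.List.slice arr (some (i : Int)) (some ((j : Int) + 1)))
      = cost arr i j := by
  have hcast : ((j : Int) + 1) = ((j + 1 : Nat) : Int) := by push_cast; ring
  rw [hcast, PySem.List.slice_natCast]
  set sub := List.take (j + 1 - i) (List.drop i arr) with hsub
  set m := j + 1 - i with hmdef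
  have hm : sub.length = m := by
    rw [hsub]
    simp only [List.length_take, List.length_drop]
    omega
  have hsubget : ∀ p : Nat, p < m → sub.getD p 0 = ga arr (i + p) := by
    intro p hp
    rw [hsub]
    exact getD_slice arr i p (j + 1 - i) hp
  simp only [find_min_matching_cost, hm]
  have hdiv : ((m : Int)) / 2 = ((m / 2 : Nat) : Int) := by omega
  simp only [hdiv, PySem.List.pyRange_zero_nat, List.foldl_map]
  by_cases hpar : m % 2 = 1
  · -- odd slice length: window (i, j-1)
    rw [if_pos (by omega)]
    have hc : 0 < m / 2 := by omega
    rw [PySem.List.foldl_congr_mem _ _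
      (fun (mc : Int) (k : Nat) => max mc (ga arr (i + k) + ga arr ((j - 1) - k))) 0 ?_]
    · rw [fold_max arr (m / 2) i (j - 1) 0 hc (by omega)]
      unfold cost
      rw [if_neg (by omega)]
    · intro acc k hk
      rw [List.mem_range] at hk
      have h2 : (-2 - (k : Int)) = -((k + 2 : Nat) : Int) := by push_cast; ring
      rw [h2, pvG_natCast, pvG_neg sub (k + 2) (by omega) (by omega), hm,
        hsubget k (by omega), hsubget (m - (k + 2)) (by omega)]
      have : i + (m - (k + 2)) = (j - 1) - k := by omega
      rw [this]
  · rw [if_neg (by omega)]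
    have hc : 0 < m / 2 := by omega
    rw [PySem.List.foldl_congr_mem _ _
      (fun (mc : Int) (k : Nat) => max mc (ga arr (i + k) + ga arr (j - k))) 0 ?_]
    · rw [fold_max arr (m / 2) i j 0 hc (by omega)]
      unfold cost
      rw [if_pos (by omega)]
    · intro acc k hk
      rw [List.mem_range] at hk
      have h2 : (-1 - (k : Int)) = -((k + 1 : Nat) : Int) := by push_cast; ring
      rw [h2, pvG_natCast, pvG_neg sub (k + 1) (by omega) (by omega), hm,
        hsubget k (by omega), hsubget (m - (k + 1)) (by omega)]
      have : i + (m - (k + 1)) = j - k := by omega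
      rw [this]

theorem cost_nonneg (arr : List Int) (i j : Nat) : 0 ≤ cost arr i j := by
  unfold cost; split <;> exact le_max_left 0 _

-- A-side characterisation
theorem row_zero_top (arr : List Int) (M : Int) (i : Nat) (h : arr.length ≤ i + 1) :
    row arr M i = 0 := by
  unfold row
  rw [Finset.Ico_eq_empty (by omega)]
  simp

theorem loopJ_good (arr : List Int) (M : Int) (i : Nat) (hgood : ga arr i < M) :
    ∀ (d k : Nat) (s : Int), i < k → arr.length - k ≤ d →
      pvLoopJ arr M (i : Int) (PySem.List.pyRange (k : Int) (arr.length : Int) 1) s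
        = (s + ∑ j ∈ Finset.Ico k arr.length, pay arr M i j, false) := by
  intro d
  induction d with
  | zero =>
    intro k s hik hd
    rw [PySem.List.pyRange_one_eq_nil (by exact_mod_cast Nat.le_of_sub_eq_zero (by omega))]
    rw [Finset.Ico_eq_empty (by omega)]
    simp [pvLoopJ]
  | succ d ih =>
    intro k s hik hd
    by_cases hk : k < arr.length
    · rw [PySem.List.pyRange_one_cons (by exact_mod_cast hk)]
      simp only [pvLoopJ]
      have hcast : ((k : Int) + 1) = ((k + 1 : Nat) : Int) := by push_cast; ring
      rw [hcast, PySem.List.slice_natCast]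
      have hg0 : pvG (List.take (k + 1 - i) (List.drop i arr)) 0 = ga arr i := by
        have := pvG_natCast (List.take (k + 1 - i) (List.drop i arr)) 0
        rw [show ((0 : Nat) : Int) = 0 from rfl] at this
        rw [this, getD_slice arr i 0 (k + 1 - i) (by omega)]
        norm_num
      have hlen : (List.take (k + 1 - i) (List.drop i arr)).length = k + 1 - i := by
        simp only [List.length_take, List.length_drop]; omega
      have hg1 : pvG (List.take (k + 1 - i) (List.drop i arr)) (-1) = ga arr k := by
        have h1 := pvG_neg (List.take (k + 1 - i) (List.drop i arr)) 1 (by omega) (by omega)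
        rw [show (-((1 : Nat) : Int)) = -1 from rfl] at h1
        rw [h1, hlen, getD_slice arr i (k + 1 - i - 1) (k + 1 - i) (by omega)]
        congr 1
        omega
      have hfs : find_min_matching_cost (List.take (k + 1 - i) (List.drop i arr)) = cost arr i k := by
        have := find_slice arr i k hik hk
        rw [hcast, PySem.List.slice_natCast] at this
        exact this
      rw [hg0, if_pos hgood, hfs, hg1]
      have hstep : (if cost arr i k ≤ M then s + (ga arr k - ga arr i) else s) = s + pay arr M i k := by
        unfold pay
        split <;> simp
      rw [hstep, ih (k + 1) (s + pay arr M i k) (by omega) (by omega)]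
      rw [Finset.sum_eq_sum_Ico_succ_bot hk]
      simp only [Prod.mk.injEq]
      exact ⟨by ring, trivial⟩
    · rw [PySem.List.pyRange_one_eq_nil (by exact_mod_cast (by omega : arr.length ≤ k))]
      rw [Finset.Ico_eq_empty (by omega)]
      simp [pvLoopJ]

theorem loopJ_bad (arr : List Int) (M : Int) (i : Nat) (hi1 : i + 1 < arr.length)
    (hbad : M ≤ ga arr i) (s : Int) :
    pvLoopJ arr M (i : Int) (PySem.List.pyRange ((i : Int) + 1) (arr.length : Int) 1) s
      = (s, true) := by
  rw [show ((i : Int) + 1) = ((i + 1 : Nat) : Int) from by push_cast; ring]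
  rw [PySem.List.pyRange_one_cons (by exact_mod_cast hi1)]
  simp only [pvLoopJ]
  rw [show ((i + 1 : Nat) : Int) + 1 = ((i + 2 : Nat) : Int) from by push_cast; ring]
  rw [PySem.List.slice_natCast]
  have hg0 : pvG (List.take (i + 2 - i) (List.drop i arr)) 0 = ga arr i := by
    have := pvG_natCast (List.take (i + 2 - i) (List.drop i arr)) 0
    rw [show ((0 : Nat) : Int) = 0 from rfl] at this
    rw [this, getD_slice arr i 0 (i + 2 - i) (by omega)]
    norm_num
  rw [hg0, if_neg (by omega)]

theorem pvLoopI_cons_return (arr : List Int) (M i s' : Int) (is : List Int) (s : Int)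
    (h : pvLoopJ arr M i (PySem.List.pyRange (i + 1) (arr.length : Int) 1) s = (s', true)) :
    pvLoopI arr M (i :: is) s = s' := by
  simp only [pvLoopI]
  rw [h]

theorem pvLoopI_cons_continue (arr : List Int) (M i s' : Int) (is : List Int) (s : Int)
    (h : pvLoopJ arr M i (PySem.List.pyRange (i + 1) (arr.length : Int) 1) s = (s', false)) :
    pvLoopI arr M (i :: is) s = pvLoopI arr M is s' := by
  simp only [pvLoopI]
  rw [h]

theorem loopI_eq (arr : List Int) (M : Int) :
    ∀ (d k : Nat) (s : Int), arr.length - k ≤ d →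
      pvLoopI arr M (PySem.List.pyRange (k : Int) (arr.length : Int) 1) s = s + SA arr M k := by
  intro d
  induction d with
  | zero =>
    intro k s hd
    rw [PySem.List.pyRange_one_eq_nil (by exact_mod_cast Nat.le_of_sub_eq_zero (by omega))]
    rw [SA, if_neg (by omega)]
    simp [pvLoopI]
  | succ d ih =>
    intro k s hd
    by_cases hk : k < arr.length
    · rw [PySem.List.pyRange_one_cons (by exact_mod_cast hk)]
      have hc1 : ((k : Int) + 1) = ((k + 1 : Nat) : Int) := by push_cast; ring
      by_cases hMg : M ≤ ga arr k
      · by_cases hk1 : k + 1 < arr.length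
        · rw [pvLoopI_cons_return arr M (k : Int) s _ s (loopJ_bad arr M k hk1 hMg s)]
          rw [SA, if_pos hk, if_pos (by omega)]
          ring
        · have hJ : pvLoopJ arr M (k : Int)
              (PySem.List.pyRange ((k : Int) + 1) (arr.length : Int) 1) s = (s, false) := by
            rw [hc1, PySem.List.pyRange_one_eq_nil
              (by exact_mod_cast (by omega : arr.length ≤ k + 1))]
            rfl
          rw [pvLoopI_cons_continue arr M (k : Int) s _ s hJ]
          have hSA1 : SA arr M (k + 1) = 0 := by rw [SA, if_neg (by omega)]
          rw [hc1, ih (k + 1) s (by omega), hSA1]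
          conv_rhs => rw [SA]
          rw [if_pos hk, if_neg (by omega), row_zero_top arr M k (by omega)]
          rw [hSA1]
          ring
      · have hgood : ga arr k < M := by omega
        have hJ : pvLoopJ arr M (k : Int)
            (PySem.List.pyRange ((k : Int) + 1) (arr.length : Int) 1) s
              = (s + ∑ j ∈ Finset.Ico (k + 1) arr.length, pay arr M k j, false) := by
          rw [hc1]
          exact loopJ_good arr M k hgood (arr.length) (k + 1) s (by omega) (by omega)
        rw [pvLoopI_cons_continue arr M (k : Int) _ _ s hJ]
        rw [hc1, ih (k + 1) _ (by omega)]
        conv_rhs => rw [SA]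
        rw [if_pos hk, if_neg (by omega)]
        unfold row
        ring
    · rw [PySem.List.pyRange_one_eq_nil (by exact_mod_cast (by omega : arr.length ≤ k))]
      rw [SA, if_neg (by omega)]
      simp [pvLoopI]

theorem bFrom_ge (arr : List Int) (M : Int) : ∀ (d k : Nat), arr.length - 1 - k ≤ d → k ≤ arr.length → k ≤ bFrom arr M k := by
  intro d
  induction d with
  | zero =>
    intro k hd hk
    rw [bFrom, if_neg (by omega)]
    omega
  | succ d ih =>
    intro k hd hk
    rw [bFrom]
    split
    · rename_i hlt
      split
      · omega
      · have := ih (k + 1) (by omega) (by omega)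
        omega
    · omega

theorem bFrom_le (arr : List Int) (M : Int) : ∀ (d k : Nat), arr.length - 1 - k ≤ d → bFrom arr M k ≤ arr.length := by
  intro d
  induction d with
  | zero =>
    intro k hd
    rw [bFrom, if_neg (by omega)]
  | succ d ih =>
    intro k hd
    rw [bFrom]
    split
    · split
      · omega
      · exact ih (k + 1) (by omega)
    · omega

theorem bFrom_cases (arr : List Int) (M : Int) : ∀ (d k : Nat), arr.length - 1 - k ≤ d →
    bFrom arr M k < arr.length - 1 ∨ bFrom arr M k = arr.length := by
  intro d
  induction d with
  | zero =>
    intro k hd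
    rw [bFrom, if_neg (by omega)]
    omega
  | succ d ih =>
    intro k hd
    rw [bFrom]
    split
    · split
      · omega
      · exact ih (k + 1) (by omega)
    · omega

theorem SA_eq_sum (arr : List Int) (M : Int) :
    ∀ (d k : Nat), arr.length - k ≤ d →
      SA arr M k = ∑ i ∈ Finset.Ico k (min (bFrom arr M k) arr.length), row arr M i := by
  intro d
  induction d with
  | zero =>
    intro k hd
    rw [SA, if_neg (by omega), Finset.Ico_eq_empty (by omega)]
    simp
  | succ d ih =>
    intro k hd
    by_cases hk : k < arr.length
    · rw [SA, if_pos hk]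
      by_cases hbad : k < arr.length - 1 ∧ M ≤ ga arr k
      · rw [if_pos hbad]
        have hb : bFrom arr M k = k := by
          rw [bFrom, if_pos hbad.1, if_pos hbad.2]
        rw [hb, Finset.Ico_eq_empty (by omega)]
        simp
      · rw [if_neg hbad, ih (k + 1) (by omega)]
        by_cases hk1 : k < arr.length - 1
        · have hMlt : ¬ M ≤ ga arr k := by tauto
          have hb : bFrom arr M k = bFrom arr M (k + 1) := by
            rw [bFrom, if_pos hk1, if_neg hMlt]
          have hge := bFrom_ge arr M (arr.length) (k + 1) (by omega) (by omega)
          rw [hb, ← Finset.sum_eq_sum_Ico_succ_bot (by omega)]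
        · -- k = arr.length - 1
          have hb : bFrom arr M k = arr.length := by
            rw [bFrom, if_neg (by omega)]
          have hb1 : bFrom arr M (k + 1) = arr.length := by
            rw [bFrom, if_neg (by omega)]
          rw [hb, hb1, Finset.Ico_eq_empty (by omega : ¬ k + 1 < min arr.length arr.length)]
          rw [show min arr.length arr.length = arr.length from by omega]
          rw [Finset.sum_empty, show Finset.Ico k arr.length = {k} from by
            rw [show arr.length = k + 1 from by omega]
            exact Nat.Ico_succ_singleton k]
          simp
    · rw [SA, if_neg (by omega), Finset.Ico_eq_empty (by omega)]
      simp

theorem pay_zero_of_neg (arr : List Int) (M : Int) (hM : M < 0) (i j : Nat) : pay arr M i j = 0 := by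
  have h := cost_nonneg arr i j
  unfold pay
  rw [if_neg (by omega)]

theorem SA_zero_of_neg (arr : List Int) (M : Int) (hM : M < 0) :
    ∀ (d k : Nat), arr.length - k ≤ d → SA arr M k = 0 := by
  intro d
  induction d with
  | zero =>
    intro k hd
    rw [SA, if_neg (by omega)]
  | succ d ih =>
    intro k hd
    rw [SA]
    split
    · split
      · rfl
      · have hrow : row arr M k = 0 := by
          unfold row
          refine Finset.sum_eq_zero ?_
          intro j _
          exact pay_zero_of_neg arr M hM k j
        rw [hrow, ih (k + 1) (by omega)]
        ring
    · rfl

-- B-side characterisation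
theorem findB_eq (arr : List Int) (M : Int) :
    ∀ (d k : Nat), arr.length - 1 - k ≤ d →
      pvFindB arr M (PySem.List.pyRange (k : Int) ((arr.length : Int) - 1) 1)
        = ((bFrom arr M k : Nat) : Int) := by
  intro d
  induction d with
  | zero =>
    intro k hd
    rw [PySem.List.pyRange_one_eq_nil (by omega)]
    rw [bFrom, if_neg (by omega)]
    rfl
  | succ d ih =>
    intro k hd
    by_cases hk : k < arr.length - 1
    · rw [PySem.List.pyRange_one_cons (by omega)]
      simp only [pvFindB]
      have hga : PySem.List.pyGetD arr (k : Int) 0 = ga arr k := by rw [PySem.List.pyGetD_natCast]; rfl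
      rw [hga, bFrom, if_pos hk]
      by_cases hM : M ≤ ga arr k
      · rw [if_pos hM, if_pos hM]
      · rw [if_neg hM, if_neg hM,
          show ((k : Int) + 1) = ((k + 1 : Nat) : Int) from by push_cast; ring,
          ih (k + 1) (by omega)]
    · rw [PySem.List.pyRange_one_eq_nil (by omega)]
      rw [bFrom, if_neg (by omega)]
      rfl

theorem pvRow_correct (arr prev : List Int) (k : Nat) (hInv : RowInv arr prev (k + 1)) :
    RowInv arr (pvRow arr (k : Int) prev) k := by
  intro j hkj hjn hpar
  unfold pvRow
  rw [PySem.List.pyRange_zero_nat, List.map_map,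
    PySem.List.getD_map_range _ arr.length j _ hjn]
  simp only [Function.comp_apply]
  by_cases hj1 : j = k + 1
  · subst hj1
    rw [if_pos (by push_cast; ring)]
    rw [pvE, if_pos (by omega)]
    have h1 : PySem.List.pyGetD arr (k : Int) 0 = ga arr k := by rw [PySem.List.pyGetD_natCast]; rfl
    have h2 : PySem.List.pyGetD arr ((k + 1 : Nat) : Int) 0 = ga arr (k + 1) := by rw [PySem.List.pyGetD_natCast]; rfl
    rw [h1, h2]
  · have hj3 : k + 3 ≤ j := by omega
    rw [if_neg (by
      intro hc
      exact hj1 (by exact_mod_cast hc))]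
    rw [if_pos (by
      constructor
      · exact_mod_cast hkj
      · omega)]
    have h1 : PySem.List.pyGetD arr (k : Int) 0 = ga arr k := by rw [PySem.List.pyGetD_natCast]; rfl
    have h2 : PySem.List.pyGetD arr ((j : Nat) : Int) 0 = ga arr j := by rw [PySem.List.pyGetD_natCast]; rfl
    have h3 : PySem.List.pyGetD prev ((j : Int) - 1) 0 = prev.getD (j - 1) 0 := by
      rw [show ((j : Int) - 1) = ((j - 1 : Nat) : Int) from by push_cast [Nat.cast_sub (by omega : 1 ≤ j)]; ring]
      rw [PySem.List.pyGetD_natCast]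
    rw [h1, h2, h3, hInv (j - 1) (by omega) (by omega) (by omega)]
    conv_rhs => rw [pvE]
    rw [if_neg (by omega)]

theorem pvRowSum_eq (arr cur : List Int) (M : Int) (hM : 0 ≤ M) (k : Nat)
    (hInv : RowInv arr cur k) :
    ∀ (d j : Nat) (s : Int), k < j → arr.length - j ≤ d →
      (PySem.List.pyRange (j : Int) (arr.length : Int) 1).foldl
        (fun t j' =>
          let e := if (j' - (k : Int)) % 2 = 1 then PySem.List.pyGetD cur j' 0 else PySem.List.pyGetD cur (j' - 1) 0
          if e ≤ M then t + (PySem.List.pyGetD arr j' 0 - PySem.List.pyGetD arr (k : Int) 0) else t) s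
        = s + ∑ j' ∈ Finset.Ico j arr.length, pay arr M k j' := by
  intro d
  induction d with
  | zero =>
    intro j s hkj hd
    rw [PySem.List.pyRange_one_eq_nil (by omega), Finset.Ico_eq_empty (by omega)]
    simp
  | succ d ih =>
    intro j s hkj hd
    by_cases hjn : j < arr.length
    · rw [PySem.List.pyRange_one_cons (by omega), List.foldl_cons]
      have hga : PySem.List.pyGetD arr ((j : Nat) : Int) 0 = ga arr j := by rw [PySem.List.pyGetD_natCast]; rfl
      have hgk : PySem.List.pyGetD arr ((k : Nat) : Int) 0 = ga arr k := by rw [PySem.List.pyGetD_natCast]; rfl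
      have hstep : (let e := if (((j : Nat) : Int) - (k : Int)) % 2 = 1 then PySem.List.pyGetD cur ((j : Nat) : Int) 0
              else PySem.List.pyGetD cur (((j : Nat) : Int) - 1) 0
            if e ≤ M then s + (PySem.List.pyGetD arr ((j : Nat) : Int) 0 - PySem.List.pyGetD arr (k : Int) 0) else s)
            = s + pay arr M k j := by
        simp only []
        by_cases hp : (j - k) % 2 = 1
        · rw [if_pos (show (((j : Nat) : Int) - (k : Int)) % 2 = 1 by omega)]
          have hcj : PySem.List.pyGetD cur ((j : Nat) : Int) 0 = pvE arr k j := by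
            rw [PySem.List.pyGetD_natCast]
            exact hInv j hkj hjn hp
          rw [hcj, hga, hgk]
          unfold pay cost
          rw [if_pos hp]
          simp only [max_le_iff]
          split_ifs <;> omega
        · rw [if_neg (show ¬ (((j : Nat) : Int) - (k : Int)) % 2 = 1 by omega)]
          have hj2 : k + 2 ≤ j := by omega
          have hcj : PySem.List.pyGetD cur (((j : Nat) : Int) - 1) 0 = pvE arr k (j - 1) := by
            rw [show (((j : Nat) : Int) - 1) = ((j - 1 : Nat) : Int) from by omega, PySem.List.pyGetD_natCast]
            exact hInv (j - 1) (by omega) (by omega) (by omega)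
          rw [hcj, hga, hgk]
          unfold pay cost
          rw [if_neg hp]
          simp only [max_le_iff]
          split_ifs <;> omega
      rw [hstep, show ((j : Int) + 1) = ((j + 1 : Nat) : Int) from by omega,
        ih (j + 1) (s + pay arr M k j) (by omega) (by omega),
        Finset.sum_eq_sum_Ico_succ_bot hjn]
      ring
    · rw [PySem.List.pyRange_one_eq_nil (by omega), Finset.Ico_eq_empty (by omega)]
      simp

theorem pvRowSum_row (arr : List Int) (M : Int) (hM : 0 ≤ M) (k : Nat) (hk : k < arr.length)
    (cur : List Int) (hInv : RowInv arr cur k) (total : Int) :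
    pvRowSum arr M (k : Int) cur total = total + row arr M k := by
  unfold pvRowSum
  rw [show ((k : Int) + 1) = ((k + 1 : Nat) : Int) from by omega]
  rw [pvRowSum_eq arr cur M hM k hInv arr.length (k + 1) total (by omega) (by omega)]
  rfl

theorem pvRows_eq (arr : List Int) (M : Int) (hM : 0 ≤ M) :
    ∀ (k : Nat) (prev : List Int) (total : Int), k + 1 < arr.length → RowInv arr prev (k + 1) →
      pvRows arr M ((bFrom arr M 0 : Nat) : Int) (PySem.List.pyRange (k : Int) (-1) (-1)) (prev, total)
        = total + ∑ i ∈ Finset.range (k + 1), (if i < bFrom arr M 0 then row arr M i else 0) := by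
  intro k
  induction k with
  | zero =>
    intro prev total hk hInv
    rw [PySem.List.pyRange_neg_one_cons (by omega)]
    simp only [pvRows]
    rw [PySem.List.pyRange_neg_one_eq_nil (by omega)]
    have hcur := pvRow_correct arr prev 0 hInv
    have htot : (if ((0 : Nat) : Int) < ((bFrom arr M 0 : Nat) : Int) then
        pvRowSum arr M ((0 : Nat) : Int) (pvRow arr ((0 : Nat) : Int) prev) total else total)
          = total + (if 0 < bFrom arr M 0 then row arr M 0 else 0) := by
      by_cases hb : 0 < bFrom arr M 0
      · rw [if_pos (by exact_mod_cast hb), if_pos hb,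
          pvRowSum_row arr M hM 0 (by omega) _ hcur total]
      · rw [if_neg (by exact_mod_cast hb), if_neg hb]
        ring
    rw [htot]
    simp only [pvRows]
    simp
  | succ k ih =>
    intro prev total hk hInv
    rw [PySem.List.pyRange_neg_one_cons (by omega)]
    simp only [pvRows]
    rw [show (((k + 1 : Nat) : Int) - 1) = ((k : Nat) : Int) from by omega]
    have hcur := pvRow_correct arr prev (k + 1) hInv
    have htot : (if ((k + 1 : Nat) : Int) < ((bFrom arr M 0 : Nat) : Int) then
        pvRowSum arr M ((k + 1 : Nat) : Int) (pvRow arr ((k + 1 : Nat) : Int) prev) total else total)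
          = total + (if k + 1 < bFrom arr M 0 then row arr M (k + 1) else 0) := by
      by_cases hb : k + 1 < bFrom arr M 0
      · rw [if_pos (by exact_mod_cast hb), if_pos hb,
          pvRowSum_row arr M hM (k + 1) (by omega) _ hcur total]
      · rw [if_neg (by exact_mod_cast hb), if_neg hb]
        ring
    rw [htot, ih (pvRow arr ((k + 1 : Nat) : Int) prev)
      (total + (if k + 1 < bFrom arr M 0 then row arr M (k + 1) else 0)) (by omega) hcur]
    conv_rhs => rw [Finset.sum_range_succ]
    ring

theorem sum_bridge (arr : List Int) (M : Int) (hn : 2 ≤ arr.length) :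
    ∑ i ∈ Finset.Ico 0 (min (bFrom arr M 0) arr.length), row arr M i
      = ∑ i ∈ Finset.range (arr.length - 1), (if i < bFrom arr M 0 then row arr M i else 0) := by
  have hbcase := bFrom_cases arr M arr.length 0 (by omega)
  have hble := bFrom_le arr M arr.length 0 (by omega)
  rcases hbcase with h | h
  · have hmin : min (bFrom arr M 0) arr.length = bFrom arr M 0 := by omega
    rw [hmin]
    have hfil : (Finset.range (arr.length - 1)).filter (fun i => i < bFrom arr M 0)
        = Finset.range (bFrom arr M 0) := by
      ext x
      simp only [Finset.mem_filter, Finset.mem_range]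
      omega
    rw [← Finset.sum_filter, hfil, Finset.range_eq_Ico]
  · have hmin : min (bFrom arr M 0) arr.length = arr.length := by omega
    rw [hmin]
    have hgate : ∀ i ∈ Finset.range (arr.length - 1),
        (if i < bFrom arr M 0 then row arr M i else 0) = row arr M i := by
      intro i hi
      rw [Finset.mem_range] at hi
      rw [if_pos (by omega)]
    rw [Finset.sum_congr rfl hgate, ← Finset.range_eq_Ico,
      show arr.length = (arr.length - 1) + 1 from by omega, Finset.sum_range_succ,
      row_zero_top arr M (arr.length - 1) (by omega)]
    rw [show arr.length - 1 + 1 - 1 = arr.length - 1 from by omega]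
    simp

-- ===== VERDICT (by name: the statement is the Claim_ definition above) =====
theorem calculate_sum_of_matching_costs_spec : Claim_equal_calculate_sum_of_matching_costs := by
  intro arr M _
  unfold Spec_calculate_sum_of_matching_costs
  have hA : calculate_sum_of_matching_costs arr M = SA arr M 0 := by
    unfold calculate_sum_of_matching_costs
    have h := loopI_eq arr M arr.length 0 0 (by omega)
    rw [show ((0 : Nat) : Int) = 0 from rfl] at h
    rw [h]
    ring
  rw [hA]
  unfold calculate_sum_of_matching_costs_alt
  simp only []
  by_cases hM : M < 0
  · rw [if_pos hM]
    exact SA_zero_of_neg arr M hM arr.length 0 (by omega)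
  · rw [if_neg hM]
    have hb := findB_eq arr M arr.length 0 (by omega)
    rw [show ((0 : Nat) : Int) = 0 from rfl] at hb
    rw [hb]
    have hSA := SA_eq_sum arr M arr.length 0 (by omega)
    by_cases hn : 2 ≤ arr.length
    · rw [show ((arr.length : Int) - 2) = ((arr.length - 2 : Nat) : Int) from by omega]
      rw [pvRows_eq arr M (by omega) (arr.length - 2) (List.replicate arr.length 0) 0 (by omega)
        (by intro j hj1 hj2 hj3; exact absurd hj2 (by omega))]
      rw [show arr.length - 2 + 1 = arr.length - 1 from by omega]
      rw [hSA, sum_bridge arr M hn]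
      ring
    · have hnil : PySem.List.pyRange ((arr.length : Int) - 2) (-1) (-1) = [] :=
        PySem.List.pyRange_neg_one_eq_nil (by omega)
      rw [hnil]
      simp only [pvRows]
      rw [hSA]
      refine Finset.sum_eq_zero ?_
      intro i hi
      rw [Finset.mem_Ico] at hi
      exact row_zero_top arr M i (by omega)
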